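-- pv_equiv track=rewrite | github.com/krishnamohan-kothapalli/matchmyjobs | backend/engine/diagnostics.py | _find_next_section
-- ===== SOURCE A (Python) =====
-- _STANDARD_HEADINGS = {
--     "summary":     ["summary", "professional summary", "profile", "objective",
--                     "professional profile", "career objective"],
--     "experience":  ["experience", "work experience", "professional experience",
--                     "employment history", "work history", "career history"],
--     "education":   ["education", "academic background", "academic history",
--                     "qualifications", "degrees"],
--     "skills":      ["skills", "technical skills", "core competencies",
--                     "key skills", "areas of expertise", "competencies"],
-- }
--
-- def _find_next_section(text: str, start_pos: int) -> int:
--     all_headings = [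
--         h for variants in _STANDARD_HEADINGS.values()
--         for h in variants
--     ]
--     next_pos = len(text)
--     for heading in all_headings:
--         pos = text.find(heading, start_pos + 5)
--         if pos != -1 and pos < next_pos:
--             next_pos = pos
--     return next_pos
-- ===== SOURCE B (Python) =====
-- # B: single left-to-right scan over positions, checking each known heading as a
-- # prefix at the current index; returns the first hit (or len(text)), instead of
-- # A's per-heading min-over-find passes.
-- _STANDARD_HEADINGS = {
--     "summary":     ["summary", "professional summary", "profile", "objective",
--                     "professional profile", "career objective"],
--     "experience":  ["experience", "work experience", "professional experience",
--                     "employment history", "work history", "career history"],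
--     "education":   ["education", "academic background", "academic history",
--                     "qualifications", "degrees"],
--     "skills":      ["skills", "technical skills", "core competencies",
--                     "key skills", "areas of expertise", "competencies"],
-- }
--
-- _ALL_HEADINGS = [h for variants in _STANDARD_HEADINGS.values() for h in variants]
--
--
-- def _find_next_section(text: str, start_pos: int) -> int:
--     n = len(text)
--     start = start_pos + 5
--     if start < 0:
--         start += n
--         if start < 0:
--             start = 0
--     for i in range(start, n):
--         if any(text.startswith(h, i) for h in _ALL_HEADINGS):
--             return i
--     return n
-- ===== Notes on version B (the rewrite author's own statement) =====
-- stated objective: alternative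
-- what changed: Replaces A's 23 per-heading str.find passes with min-tracking by a single left-to-right scan over positions that returns the first index at which any heading is a prefix (replicating str.find's negative-start clamping once up front).
import Mathlib
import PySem

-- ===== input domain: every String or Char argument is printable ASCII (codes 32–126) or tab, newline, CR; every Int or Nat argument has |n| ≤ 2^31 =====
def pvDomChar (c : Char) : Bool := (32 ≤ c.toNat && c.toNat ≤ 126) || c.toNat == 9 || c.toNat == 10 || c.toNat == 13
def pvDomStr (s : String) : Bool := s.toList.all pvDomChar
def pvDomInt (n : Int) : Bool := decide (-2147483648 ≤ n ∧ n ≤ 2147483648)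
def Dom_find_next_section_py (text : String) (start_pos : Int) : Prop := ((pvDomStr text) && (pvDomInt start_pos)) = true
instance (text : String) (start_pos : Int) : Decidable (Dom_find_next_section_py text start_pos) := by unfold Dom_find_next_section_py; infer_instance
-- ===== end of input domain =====

-- B replaces A's per-heading min-over-find passes by one left-to-right scan of the
-- positions that returns the first index where any heading starts (objective: alternative).

-- ===== PORT A =====
def pvStdHeadings : PySem.Dict String (List String) :=
  ⟨[("summary",    ["summary", "professional summary", "profile", "objective",
                    "professional profile", "career objective"]),
    ("experience", ["experience", "work experience", "professional experience",
                    "employment history", "work history", "career history"]),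
    ("education",  ["education", "academic background", "academic history",
                    "qualifications", "degrees"]),
    ("skills",     ["skills", "technical skills", "core competencies",
                    "key skills", "areas of expertise", "competencies"])]⟩

def find_next_section_py (text : String) (start_pos : Int) : Int :=
  let all_headings := (PySem.Dict.values pvStdHeadings).flatMap (fun variants => variants)
  all_headings.foldl
    (fun next_pos heading =>
      let pos := PySem.Str.findFrom text heading (start_pos + 5)
      if pos ≠ -1 ∧ pos < next_pos then pos else next_pos)
    (PySem.Str.len text)

-- ===== PORT B =====
def pvAllHeadings : List String :=
  ["summary", "professional summary", "profile", "objective",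
   "professional profile", "career objective",
   "experience", "work experience", "professional experience",
   "employment history", "work history", "career history",
   "education", "academic background", "academic history",
   "qualifications", "degrees",
   "skills", "technical skills", "core competencies",
   "key skills", "areas of expertise", "competencies"]

-- text.startswith(h, i) for 0 ≤ i is exact as 'h is a prefix of text[i:]'
def pvHit (cs : List Char) (i : Nat) : Bool :=
  pvAllHeadings.any (fun h => PySem.Chars.startswith (cs.drop i) h.toList)

-- Source B's 'for i in range(start, n)' loop
def pvScan (cs : List Char) (i : Nat) : Int :=
  if i < cs.length then
    (if pvHit cs i then (i : Int) else pvScan cs (i + 1))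
  else (cs.length : Int)
termination_by cs.length - i

def find_next_section_py_alt (text : String) (start_pos : Int) : Int :=
  let cs := text.toList
  let n : Int := cs.length
  let start0 := start_pos + 5
  let start : Int :=
    if start0 < 0 then (if start0 + n < 0 then 0 else start0 + n) else start0
  pvScan cs start.toNat

-- ===== PRECONDITION & SPEC =====
def Spec_find_next_section_py (text : String) (start_pos : Int) (out : Int) : Prop := out = find_next_section_py_alt text start_pos
instance (text : String) (start_pos : Int) (out : Int) : Decidable (Spec_find_next_section_py text start_pos out) := by unfold Spec_find_next_section_py; infer_instance

-- ===== CLAIM (what is proved, stated in full; the proofs are below) =====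
def Claim_equal_find_next_section_py : Prop := ∀ (text : String) (start_pos : Int), Dom_find_next_section_py text start_pos → Spec_find_next_section_py text start_pos (find_next_section_py text start_pos)

-- ===== LEMMAS AND PROOFS =====

theorem pvScan_ge (cs : List Char) (i : Nat) (h : cs.length ≤ i) :
    pvScan cs i = (cs.length : Int) := by
  unfold pvScan
  simp [Nat.not_lt.mpr h]

theorem pvHit_iff (cs : List Char) (i : Nat) :
    pvHit cs i = true ↔ ∃ h ∈ pvAllHeadings, h.toList <+: cs.drop i := by
  unfold pvHit
  simp [PySem.Chars.startswith, List.isPrefixOf_iff_prefix]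

theorem pvScan_spec (cs : List Char) (i : Nat) :
    (pvScan cs i ≤ (cs.length : Int)) ∧
    (i ≤ cs.length → (i : Int) ≤ pvScan cs i) ∧
    (pvScan cs i < (cs.length : Int) → pvHit cs (pvScan cs i).toNat = true) ∧
    (∀ j : Nat, i ≤ j → (j : Int) < pvScan cs i → pvHit cs j = false) := by
  fun_induction pvScan cs i with
  | case1 i hlt hhit =>
      refine ⟨by omega, fun _ => le_refl _, ?_, ?_⟩
      · intro _; simpa using hhit
      · intro j hj hjlt; omega
  | case2 i hlt hhit ih =>
      obtain ⟨h1, h2, h3, h4⟩ := ih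
      refine ⟨h1, ?_, h3, ?_⟩
      · intro _
        have := h2 (by omega)
        omega
      · intro j hj hjlt
        rcases Nat.eq_or_lt_of_le hj with rfl | hj'
        · simpa using hhit
        · exact h4 j hj' hjlt
  | case3 i hge =>
      refine ⟨le_refl _, by omega, by omega, ?_⟩
      intro j hj hjlt; omega

-- A's findFrom at the raw int start equals findFrom at the (nonnegative) clamped start
theorem findFrom_clamp (cs sub : List Char) (s0 t : Int) (h0 : 0 ≤ t)
    (ht : t = if s0 < 0 then (if s0 + (cs.length : Int) < 0 then 0 else s0 + (cs.length : Int)) else s0) :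
    PySem.Chars.findFrom cs sub s0 none = PySem.Chars.findFrom cs sub t none := by
  simp only [PySem.Chars.findFrom]
  rw [if_neg (not_lt.mpr h0), ← ht]

theorem findFrom_big (cs sub : List Char) (t : Int) (h0 : 0 ≤ t)
    (hn : (cs.length : Int) < t) :
    PySem.Chars.findFrom cs sub t none = -1 := by
  simp only [PySem.Chars.findFrom]
  rw [if_neg (not_lt.mpr h0), if_pos hn]

-- the min-fold invariant for A's loop
theorem foldl_min_spec (g : String → Int) (l : List String) (acc : Int) :
    (l.foldl (fun np h => if g h ≠ -1 ∧ g h < np then g h else np) acc ≤ acc) ∧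
    (l.foldl (fun np h => if g h ≠ -1 ∧ g h < np then g h else np) acc = acc ∨
      ∃ h ∈ l, l.foldl (fun np h => if g h ≠ -1 ∧ g h < np then g h else np) acc = g h ∧ g h ≠ -1) ∧
    (∀ h ∈ l, g h ≠ -1 → l.foldl (fun np h => if g h ≠ -1 ∧ g h < np then g h else np) acc ≤ g h) := by
  induction l generalizing acc with
  | nil => simp
  | cons x xs ih =>
      simp only [List.foldl_cons]
      by_cases hx : g x ≠ -1 ∧ g x < acc
      · obtain ⟨h1, h2, h3⟩ := ih (g x)
        rw [if_pos hx]
        refine ⟨by omega, ?_, ?_⟩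
        · rcases h2 with h2 | ⟨h, hh, he, hne⟩
          · exact Or.inr ⟨x, List.mem_cons_self, h2, hx.1⟩
          · exact Or.inr ⟨h, List.mem_cons_of_mem _ hh, he, hne⟩
        · intro h hh hne
          rcases List.mem_cons.mp hh with rfl | hh'
          · omega
          · exact h3 h hh' hne
      · obtain ⟨h1, h2, h3⟩ := ih acc
        rw [if_neg hx]
        refine ⟨h1, ?_, ?_⟩
        · rcases h2 with h2 | ⟨h, hh, he, hne⟩
          · exact Or.inl h2
          · exact Or.inr ⟨h, List.mem_cons_of_mem _ hh, he, hne⟩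
        · intro h hh hne
          rcases List.mem_cons.mp hh with rfl | hh'
          · by_cases hlt : g h < acc
            · exact absurd ⟨hne, hlt⟩ hx
            · omega
          · exact h3 h hh' hne

theorem all_headings_eq :
    (PySem.Dict.values pvStdHeadings).flatMap (fun variants => variants) = pvAllHeadings := by
  decide

-- the core equality at a nonnegative in-range start index k
theorem pv_core (cs : List Char) (k : Nat) (hk : k ≤ cs.length) :
    pvAllHeadings.foldl
      (fun np h =>
        if PySem.Chars.findFrom cs h.toList (k : Int) none ≠ -1 ∧
            PySem.Chars.findFrom cs h.toList (k : Int) none < np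
         then PySem.Chars.findFrom cs h.toList (k : Int) none else np)
      (cs.length : Int)
    = pvScan cs k := by
  have ha := foldl_min_spec (fun h => PySem.Chars.findFrom cs h.toList (k : Int) none)
    pvAllHeadings (cs.length : Int)
  beta_reduce at ha
  obtain ⟨ha1, ha2, ha3⟩ := ha
  obtain ⟨hb1, hb2', hb3, hb4⟩ := pvScan_spec cs k
  have hb2 := hb2' hk
  -- B ≤ A
  have hba : pvScan cs k ≤
      pvAllHeadings.foldl
        (fun np h =>
          if PySem.Chars.findFrom cs h.toList (k : Int) none ≠ -1 ∧
              PySem.Chars.findFrom cs h.toList (k : Int) none < np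
           then PySem.Chars.findFrom cs h.toList (k : Int) none else np)
        (cs.length : Int) := by
    rcases ha2 with h2 | ⟨h, hh, he, hne⟩
    · omega
    · obtain ⟨hle, hpre, _⟩ := PySem.Chars.findFrom_natCast_spec cs h.toList k hk hne
      have hhit : pvHit cs (PySem.Chars.findFrom cs h.toList (k : Int) none).toNat = true :=
        (pvHit_iff cs _).mpr ⟨h, hh, hpre⟩
      rw [he]
      by_contra hcon
      have hlt : ((PySem.Chars.findFrom cs h.toList (k : Int) none).toNat : Int)
          < pvScan cs k := by omega
      have := hb4 _ (by omega) hlt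
      simp [hhit] at this
  -- A ≤ B
  have hab : pvAllHeadings.foldl
        (fun np h =>
          if PySem.Chars.findFrom cs h.toList (k : Int) none ≠ -1 ∧
              PySem.Chars.findFrom cs h.toList (k : Int) none < np
           then PySem.Chars.findFrom cs h.toList (k : Int) none else np)
        (cs.length : Int)
      ≤ pvScan cs k := by
    by_cases hbn : pvScan cs k < (cs.length : Int)
    · obtain ⟨h, hh, hpre⟩ := (pvHit_iff cs (pvScan cs k).toNat).mp (hb3 hbn)
      -- the heading B finds occurs at or after k, so A's find for it succeeds
      have hinfix : h.toList <:+: cs.drop k := by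
        have hdd : cs.drop (pvScan cs k).toNat
            = (cs.drop k).drop ((pvScan cs k).toNat - k) := by
          rw [List.drop_drop]
          congr 1
          omega
        rw [hdd] at hpre
        exact hpre.isInfix.trans (List.drop_suffix _ _).isInfix
      have hne : PySem.Chars.findFrom cs h.toList (k : Int) none ≠ -1 := by
        rw [Ne, PySem.Chars.findFrom_natCast_eq_neg_one_iff cs h.toList k hk]
        simpa using hinfix
      obtain ⟨hle, _, hmin⟩ := PySem.Chars.findFrom_natCast_spec cs h.toList k hk hne
      have hnotlt :
          ¬ ((pvScan cs k).toNat < (PySem.Chars.findFrom cs h.toList (k : Int) none).toNat) :=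
        fun hcon => hmin (pvScan cs k).toNat (by omega) hcon hpre
      have := ha3 h hh hne
      omega
    · omega
  omega

-- the core equality, on the list-of-chars level, at the raw int start
theorem pv_main (cs : List Char) (s0 : Int) :
    pvAllHeadings.foldl
      (fun np h =>
        if PySem.Chars.findFrom cs h.toList s0 none ≠ -1 ∧
            PySem.Chars.findFrom cs h.toList s0 none < np
         then PySem.Chars.findFrom cs h.toList s0 none else np)
      (cs.length : Int)
    = pvScan cs (if s0 < 0 then (if s0 + (cs.length : Int) < 0 then 0 else s0 + (cs.length : Int)) else s0).toNat := by
  set st : Int := if s0 < 0 then (if s0 + (cs.length : Int) < 0 then 0 else s0 + (cs.length : Int)) else s0 with hst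
  have hst0 : 0 ≤ st := by rw [hst]; split_ifs <;> omega
  have hclamp : ∀ sub : List Char,
      PySem.Chars.findFrom cs sub s0 none = PySem.Chars.findFrom cs sub st none :=
    fun sub => findFrom_clamp cs sub s0 st hst0 hst
  simp only [hclamp]
  by_cases hbig : (cs.length : Int) < st
  · -- start beyond the end: every find is -1, A keeps len(text), B's range is empty
    have hne : ∀ sub : List Char, PySem.Chars.findFrom cs sub st none = -1 :=
      fun sub => findFrom_big cs sub st hst0 hbig
    rw [pvScan_ge cs st.toNat (by omega)]
    have ha := foldl_min_spec (fun h => PySem.Chars.findFrom cs h.toList st none)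
      pvAllHeadings (cs.length : Int)
    beta_reduce at ha
    rcases ha.2.1 with h2 | ⟨h, _, _, hcon⟩
    · exact h2
    · exact absurd (hne h.toList) hcon
  · have hstk : st = (st.toNat : Int) := by omega
    rw [hstk]
    simp only [Int.toNat_natCast]
    exact pv_core cs st.toNat (by omega)

-- ===== VERDICT (by name: the statement is the Claim_ definition above) =====
theorem find_next_section_py_spec : Claim_equal_find_next_section_py := by
  intro text start_pos _
  unfold Spec_find_next_section_py find_next_section_py find_next_section_py_alt
  have := pv_main text.toList (start_pos + 5)
  simpa [all_headings_eq, PySem.Str.len_eq, PySem.Str.findFrom_eq] using this
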